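-- pv_equiv track=rewrite | github.com/oklen/BERT_TUNEAgine | generate_exampleDream.py | get_doc_tree
-- ===== SOURCE A (Python) =====
-- def get_doc_tree(is_sentence_end, is_paragraph_end, orig_tok_idx):
--     doc_len = len(is_sentence_end)
--     document = []
--     paragraph = []
--     sentence = []
--     for i in range(doc_len):
--         sentence.append((orig_tok_idx[i], i))
--
--         if is_sentence_end[i]:
--             paragraph.append((-1, sentence))
--             sentence = []
--         if is_paragraph_end[i]:
--             assert len(sentence) == 0
--             document.append(paragraph)
--             paragraph = []
--     assert len(sentence) == 0
--     assert len(paragraph) == 0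
--     return document
-- ===== SOURCE B (Python) =====
-- def get_doc_tree(is_sentence_end, is_paragraph_end, orig_tok_idx):
--     # pass 1: split the token stream into sentences, remembering each
--     # sentence's closing token index
--     sentences = []
--     cur = []
--     for i, end in enumerate(is_sentence_end):
--         cur.append((orig_tok_idx[i], i))
--         if end:
--             sentences.append((i, cur))
--             cur = []
--     assert not cur  # every token must belong to a terminated sentence
--     # pass 2: group the sentences into paragraphs at paragraph boundaries
--     document = []
--     paragraph = []
--     for close_idx, sent in sentences:
--         paragraph.append((-1, sent))
--         if is_paragraph_end[close_idx]:
--             document.append(paragraph)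
--             paragraph = []
--     assert not paragraph  # every sentence must belong to a terminated paragraph
--     return document
-- ===== Notes on version B (the rewrite author's own statement) =====
-- stated objective: alternative
-- what changed: A's single loop threading a three-level (document, paragraph, sentence) accumulator is replaced by two flat passes: one pass splits the tokens into sentences tagged with their closing index, a second pass groups those sentences into paragraphs.
import Mathlib
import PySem

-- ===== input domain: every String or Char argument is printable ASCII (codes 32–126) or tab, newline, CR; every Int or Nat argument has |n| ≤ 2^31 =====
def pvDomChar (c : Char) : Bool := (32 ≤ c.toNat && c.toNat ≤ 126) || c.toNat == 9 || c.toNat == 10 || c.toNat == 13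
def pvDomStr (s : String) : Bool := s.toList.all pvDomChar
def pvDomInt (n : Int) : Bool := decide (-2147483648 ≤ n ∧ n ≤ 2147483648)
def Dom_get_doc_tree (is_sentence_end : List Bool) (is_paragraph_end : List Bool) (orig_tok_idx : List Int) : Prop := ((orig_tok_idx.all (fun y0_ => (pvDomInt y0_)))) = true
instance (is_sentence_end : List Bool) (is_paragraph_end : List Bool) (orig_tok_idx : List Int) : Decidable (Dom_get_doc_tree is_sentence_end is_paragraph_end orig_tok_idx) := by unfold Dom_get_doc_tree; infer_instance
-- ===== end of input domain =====

-- B replaces A's single loop over a three-level accumulator by two flat passes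
-- (tokens → sentences, then sentences → paragraphs); objective: alternative decomposition.

-- ===== PORT A =====
-- one iteration of A's for-loop; state = (document, paragraph, sentence).
-- A's asserts can only fire outside Pre_get_doc_tree, so the port omits them.
def gdtA_step (is_sentence_end is_paragraph_end : List Bool) (orig_tok_idx : List Int)
    (st : List (List (Int × (List (Int × Int)))) × List (Int × (List (Int × Int))) × List (Int × Int))
    (i : Nat) :
    List (List (Int × (List (Int × Int)))) × List (Int × (List (Int × Int))) × List (Int × Int) :=
  let sen := st.2.2 ++ [(orig_tok_idx.getD i 0, (i : Int))]
  let ps := if is_sentence_end.getD i false then (st.2.1 ++ [((-1 : Int), sen)], ([] : List (Int × Int))) else (st.2.1, sen)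
  let ds := if is_paragraph_end.getD i false then (st.1 ++ [ps.1], ([] : List (Int × (List (Int × Int))))) else (st.1, ps.1)
  (ds.1, ds.2, ps.2)

def get_doc_tree (is_sentence_end : List Bool) (is_paragraph_end : List Bool) (orig_tok_idx : List Int) : List (List (Int × (List (Int × Int)))) :=
  ((List.range is_sentence_end.length).foldl
    (gdtA_step is_sentence_end is_paragraph_end orig_tok_idx) ([], [], [])).1

-- ===== PORT B =====
-- pass 1 (Source B): split tokens into sentences tagged with their closing index
def gdtB1_step (is_sentence_end : List Bool) (orig_tok_idx : List Int)
    (st : List (Nat × List (Int × Int)) × List (Int × Int)) (i : Nat) :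
    List (Nat × List (Int × Int)) × List (Int × Int) :=
  let cur := st.2 ++ [(orig_tok_idx.getD i 0, (i : Int))]
  if is_sentence_end.getD i false then (st.1 ++ [(i, cur)], []) else (st.1, cur)

def gdtB_pass1 (is_sentence_end : List Bool) (orig_tok_idx : List Int) :
    List (Nat × List (Int × Int)) × List (Int × Int) :=
  (List.range is_sentence_end.length).foldl (gdtB1_step is_sentence_end orig_tok_idx) ([], [])

-- pass 2 (Source B): group sentences into paragraphs at paragraph boundaries
def gdtB2_step (is_paragraph_end : List Bool)
    (st : List (List (Int × (List (Int × Int)))) × List (Int × (List (Int × Int))))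
    (s : Nat × List (Int × Int)) :
    List (List (Int × (List (Int × Int)))) × List (Int × (List (Int × Int))) :=
  let par := st.2 ++ [((-1 : Int), s.2)]
  if is_paragraph_end.getD s.1 false then (st.1 ++ [par], []) else (st.1, par)

def get_doc_tree_alt (is_sentence_end : List Bool) (is_paragraph_end : List Bool) (orig_tok_idx : List Int) : List (List (Int × (List (Int × Int)))) :=
  (((gdtB_pass1 is_sentence_end orig_tok_idx).1).foldl (gdtB2_step is_paragraph_end) ([], [])).1

-- ===== PRECONDITION & SPEC =====
-- Pre_ is exactly where Python A returns: both other lists long enough (else IndexError),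
-- every paragraph end is also a sentence end, and a nonempty input ends a sentence and a
-- paragraph at its last position (else an assert fires).
def Pre_get_doc_tree (is_sentence_end : List Bool) (is_paragraph_end : List Bool) (orig_tok_idx : List Int) : Prop :=
  is_sentence_end.length ≤ is_paragraph_end.length ∧
  is_sentence_end.length ≤ orig_tok_idx.length ∧
  (∀ i < is_sentence_end.length, is_paragraph_end.getD i false = true → is_sentence_end.getD i false = true) ∧
  (0 < is_sentence_end.length →
    is_sentence_end.getD (is_sentence_end.length - 1) false = true ∧
    is_paragraph_end.getD (is_sentence_end.length - 1) false = true)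
instance (is_sentence_end : List Bool) (is_paragraph_end : List Bool) (orig_tok_idx : List Int) : Decidable (Pre_get_doc_tree is_sentence_end is_paragraph_end orig_tok_idx) := by unfold Pre_get_doc_tree; infer_instance

def pvWitness_get_doc_tree : List Bool × List Bool × List Int :=
  ([false, true, true], [false, false, true], [10, 11, 12])

def Spec_get_doc_tree (is_sentence_end : List Bool) (is_paragraph_end : List Bool) (orig_tok_idx : List Int) (out : List (List (Int × (List (Int × Int))))) : Prop := out = get_doc_tree_alt is_sentence_end is_paragraph_end orig_tok_idx
instance (is_sentence_end : List Bool) (is_paragraph_end : List Bool) (orig_tok_idx : List Int) (out : List (List (Int × (List (Int × Int))))) : Decidable (Spec_get_doc_tree is_sentence_end is_paragraph_end orig_tok_idx out) := by unfold Spec_get_doc_tree; infer_instance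

-- ===== CLAIM (what is proved, stated in full; the proofs are below) =====
def Claim_equal_get_doc_tree : Prop := ∀ (is_sentence_end : List Bool) (is_paragraph_end : List Bool) (orig_tok_idx : List Int), Dom_get_doc_tree is_sentence_end is_paragraph_end orig_tok_idx → Pre_get_doc_tree is_sentence_end is_paragraph_end orig_tok_idx → Spec_get_doc_tree is_sentence_end is_paragraph_end orig_tok_idx (get_doc_tree is_sentence_end is_paragraph_end orig_tok_idx)

-- ===== LEMMAS AND PROOFS =====

-- B's pass 1 only appends to its sentences list: the initial accumulator factors out.
theorem gdtB1_acc (se : List Bool) (ot : List Int) :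
    ∀ (L : List Nat) (s0 : List (Nat × List (Int × Int))) (cur : List (Int × Int)),
      L.foldl (gdtB1_step se ot) (s0, cur) =
        (s0 ++ (L.foldl (gdtB1_step se ot) ([], cur)).1, (L.foldl (gdtB1_step se ot) ([], cur)).2) := by
  intro L
  induction L with
  | nil => intro s0 cur; simp
  | cons i L ih =>
    intro s0 cur
    simp only [List.foldl_cons, gdtB1_step]
    by_cases h : se.getD i false = true
    · simp only [h, if_true, List.nil_append]
      rw [ih (s0 ++ [(i, cur ++ [(ot.getD i 0, (i : Int))])]) [],
          ih [(i, cur ++ [(ot.getD i 0, (i : Int))])] []]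
      simp
    · simp only [h, if_false]
      exact ih s0 _

-- main invariant: A's fold equals B's pass 1 followed by pass 2, for any index list
-- on which every paragraph end is a sentence end.
theorem gdt_main (se pe : List Bool) (ot : List Int) :
    ∀ (L : List Nat),
      (∀ i ∈ L, pe.getD i false = true → se.getD i false = true) →
      ∀ (doc : List (List (Int × (List (Int × Int))))) (par : List (Int × (List (Int × Int)))) (sen : List (Int × Int)),
      L.foldl (gdtA_step se pe ot) (doc, par, sen) =
        (((L.foldl (gdtB1_step se ot) ([], sen)).1.foldl (gdtB2_step pe) (doc, par)).1,
         ((L.foldl (gdtB1_step se ot) ([], sen)).1.foldl (gdtB2_step pe) (doc, par)).2,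
         (L.foldl (gdtB1_step se ot) ([], sen)).2) := by
  intro L
  induction L with
  | nil => intro _ doc par sen; simp
  | cons i L ih =>
    intro h doc par sen
    have hi := h i (List.mem_cons_self ..)
    have hL : ∀ j ∈ L, pe.getD j false = true → se.getD j false = true :=
      fun j hj => h j (List.mem_cons_of_mem _ hj)
    simp only [List.foldl_cons]
    by_cases hse : se.getD i false = true
    · -- sentence ends at i
      by_cases hpe : pe.getD i false = true
      · simp only [gdtA_step, gdtB1_step, hse, hpe, if_true, List.nil_append]
        rw [ih hL, gdtB1_acc se ot L [(i, sen ++ [(ot.getD i 0, (i : Int))])] []]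
        simp only [List.getD] at hpe
        simp [gdtB2_step, List.getD, hpe]
      · simp only [gdtA_step, gdtB1_step, hse, hpe, if_true, List.nil_append]
        rw [ih hL, gdtB1_acc se ot L [(i, sen ++ [(ot.getD i 0, (i : Int))])] []]
        simp only [List.getD] at hpe
        simp [gdtB2_step, List.getD, hpe]
    · -- no boundary at i (pe i must be false by the hypothesis)
      have hpe : pe.getD i false = false := by
        cases hp : pe.getD i false
        · rfl
        · exact absurd (hi hp) hse
      simp only [gdtA_step, gdtB1_step, hse, hpe, if_false, Bool.false_eq_true]
      exact ih hL doc par _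

-- ===== VERDICT (by name: the statement is the Claim_ definition above) =====
theorem get_doc_tree_spec : Claim_equal_get_doc_tree := by
  intro se pe ot _ hpre
  unfold Spec_get_doc_tree get_doc_tree get_doc_tree_alt gdtB_pass1
  rw [gdt_main se pe ot (List.range se.length)
      (fun i hi => hpre.2.2.1 i (List.mem_range.mp hi))]
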